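-- pv_equiv track=rewrite | github.com/rhluttmer/Playfair-Cipher-Term-Project | encDecGraphics.py | makeDuplicateLetterString
-- ===== SOURCE A (Python) =====
-- def makeDuplicateLetterString(key):
--     seen = set()
--     duplicatesList = []
--     for letter in key:
--         if letter in seen:
--             duplicatesList.append(letter)
--         else:
--             seen.add(letter)
--
--     if len(duplicatesList) == 0:
--         return 'nothing'
--
--     duplicatesString = ' and '.join(duplicatesList)
--     return duplicatesString
-- ===== SOURCE B (Python) =====
-- def makeDuplicateLetterString(key):
--     positions = {}
--     for i, c in enumerate(key):
--         positions.setdefault(c, []).append(i)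
--     extras = [(i, c) for c, idxs in positions.items() for i in idxs[1:]]
--     extras = sorted(extras, key=lambda p: p[0])
--     if not extras:
--         return 'nothing'
--     return ' and '.join(c for i, c in extras)
-- ===== Notes on version B (the rewrite author's own statement) =====
-- stated objective: alternative
-- what changed: Replaced A's single pass with a maintained seen-set by a group-by strategy: build a dict mapping each character to the list of its occurrence indices, collect every index after the first per character, sort these indices, and map them back to characters before joining.
import Mathlib
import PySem

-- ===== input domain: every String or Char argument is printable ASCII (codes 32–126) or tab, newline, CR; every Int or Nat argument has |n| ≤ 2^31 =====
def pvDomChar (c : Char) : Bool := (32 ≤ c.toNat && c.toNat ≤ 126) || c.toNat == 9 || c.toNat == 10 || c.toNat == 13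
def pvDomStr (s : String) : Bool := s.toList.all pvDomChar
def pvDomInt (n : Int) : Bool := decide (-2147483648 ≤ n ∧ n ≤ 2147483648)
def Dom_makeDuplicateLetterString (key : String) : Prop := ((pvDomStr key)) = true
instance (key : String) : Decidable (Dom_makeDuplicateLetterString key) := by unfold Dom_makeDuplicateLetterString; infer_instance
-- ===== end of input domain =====

-- B groups by character via a dict of occurrence-index lists, takes each group's indices after the first, sorts them and maps back to characters (alternative group-by/sort strategy; A is a single pass with a seen-set).


-- ===== PORT A =====
def makeDuplicateLetterString (key : String) : String :=
  let r := key.toList.foldl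
    (fun (st : PySem.Set Char × List Char) letter =>
      if PySem.Set.contains st.1 letter then (st.1, st.2 ++ [letter])
      else (PySem.Set.add st.1 letter, st.2))
    (PySem.Set.empty, [])
  if r.2.length = 0 then "nothing"
  else String.ofList (PySem.Chars.join " and ".toList (r.2.map (fun c => [c])))

-- ===== PORT B =====
def makeDuplicateLetterString_alt (key : String) : String :=
  let cs := key.toList
  -- positions.setdefault(c, []).append(i), i.e. positions[c] = positions.get(c, []) + [i]
  -- (Dict.modify c [] (· ++ [i]) is exactly d[k] = f(d.get(k, dflt)))
  let positions := (PySem.List.enumerate cs).foldl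
    (fun d (q : Int × Char) => d.modify q.2 [] (fun l => l ++ [q.1])) PySem.Dict.empty
  let extras := positions.items.flatMap (fun kv => (kv.2.drop 1).map (fun i => (i, kv.1)))
  let extras := PySem.List.sorted extras (fun p => p.1) false
  if extras.isEmpty then "nothing"
  else String.ofList (PySem.Chars.join " and ".toList (extras.map (fun p => [p.2])))

-- ===== PRECONDITION & SPEC =====
def Spec_makeDuplicateLetterString (key : String) (out : String) : Prop := out = makeDuplicateLetterString_alt key
instance (key : String) (out : String) : Decidable (Spec_makeDuplicateLetterString key out) := by unfold Spec_makeDuplicateLetterString; infer_instance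

-- ===== CLAIM (what is proved, stated in full; the proofs are below) =====
def Claim_equal_makeDuplicateLetterString : Prop := ∀ (key : String), Dom_makeDuplicateLetterString key → Spec_makeDuplicateLetterString key (makeDuplicateLetterString key)

-- ===== LEMMAS AND PROOFS =====

-- Reference: the (index, char) pairs of the occurrences whose char already appeared (s = chars already seen).
def pvDupPairs : List Char → List (Int × Char) → List (Int × Char)
  | _, [] => []
  | s, q :: rest => if q.2 ∈ s then q :: pvDupPairs (s ++ [q.2]) rest else pvDupPairs (s ++ [q.2]) rest

-- Character-only version, matching A's loop state.
def pvDupSpec : List Char → List Char → List Char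
  | _, [] => []
  | p, c :: rest => if c ∈ p then c :: pvDupSpec (p ++ [c]) rest else pvDupSpec (p ++ [c]) rest

lemma pvOfList_snoc (p : List Char) (c : Char) :
    PySem.Set.ofList (p ++ [c]) = PySem.Set.add (PySem.Set.ofList p) c := by
  simp [PySem.Set.ofList_eq_foldl, List.foldl_append]

lemma pvContains_ofList (p : List Char) (c : Char) :
    PySem.Set.contains (PySem.Set.ofList p) c = decide (c ∈ p) := by
  by_cases h : c ∈ p <;> simp [PySem.Set.mem_ofList, h]

-- A's loop computes pvDupSpec.
lemma pvA_loop : ∀ (cs p acc : List Char),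
    (cs.foldl
      (fun (st : PySem.Set Char × List Char) letter =>
        if PySem.Set.contains st.1 letter then (st.1, st.2 ++ [letter])
        else (PySem.Set.add st.1 letter, st.2))
      (PySem.Set.ofList p, acc)).2 = acc ++ pvDupSpec p cs := by
  intro cs
  induction cs with
  | nil => intro p acc; simp [pvDupSpec]
  | cons c rest ih =>
    intro p acc
    by_cases h : c ∈ p
    · have h1 : PySem.Set.add (PySem.Set.ofList p) c = PySem.Set.ofList p := by
        simp [PySem.Set.add, PySem.Set.mem_ofList, h]
      have h2 : PySem.Set.ofList p = PySem.Set.ofList (p ++ [c]) := by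
        rw [pvOfList_snoc, h1]
      simp only [List.foldl_cons, pvContains_ofList, h, decide_true, if_true]
      rw [h2, ih (p ++ [c]) (acc ++ [c]), pvDupSpec]
      simp [h]
    · simp only [List.foldl_cons, pvContains_ofList, h, decide_false, Bool.false_eq_true, if_false]
      rw [← pvOfList_snoc, ih (p ++ [c]) acc, pvDupSpec]
      simp [h]

-- pvDupSpec on the chars of a pair list is the snd-projection of pvDupPairs.
lemma pvDupSpec_eq_pairs : ∀ (ps : List (Int × Char)) (s : List Char),
    pvDupSpec s (ps.map (·.2)) = (pvDupPairs s ps).map (·.2) := by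
  intro ps
  induction ps with
  | nil => intro s; simp [pvDupSpec, pvDupPairs]
  | cons q rest ih =>
    intro s
    by_cases h : q.2 ∈ s <;> simp [pvDupSpec, pvDupPairs, h, ih]

-- Restricting pvDupPairs to one character drops exactly that character's first occurrence.
lemma pvDupPairs_filter : ∀ (ps : List (Int × Char)) (s : List Char) (c : Char),
    (pvDupPairs s ps).filter (fun q => q.2 == c) =
      if c ∈ s then ps.filter (fun q => q.2 == c)
      else (ps.filter (fun q => q.2 == c)).drop 1 := by
  intro ps
  induction ps with
  | nil => intro s c; simp [pvDupPairs]
  | cons q rest ih =>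
    intro s c
    by_cases hqs : q.2 ∈ s
    · by_cases hqc : q.2 = c
      · subst hqc
        simp [pvDupPairs, ih, hqs]
      · simp only [pvDupPairs, hqs, if_true, List.filter_cons]
        have : (q.2 == c) = false := by simp [hqc]
        simp only [this, Bool.false_eq_true, if_false, ih]
        have hmem : c ∈ s ++ [q.2] ↔ c ∈ s := by
          simp [Ne.symm hqc]
        by_cases hc : c ∈ s <;> simp [hmem, hc]
    · by_cases hqc : q.2 = c
      · subst hqc
        simp only [pvDupPairs, hqs, if_false, List.filter_cons, BEq.rfl, if_true, ih]
        have hmem : q.2 ∈ s ++ [q.2] := by simp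
        simp [hmem]
      · simp only [pvDupPairs, hqs, if_false, List.filter_cons]
        have : (q.2 == c) = false := by simp [hqc]
        simp only [this, Bool.false_eq_true, if_false, ih]
        have hmem : c ∈ s ++ [q.2] ↔ c ∈ s := by simp [Ne.symm hqc]
        by_cases hc : c ∈ s <;> simp [hmem, hc]

lemma pvDupPairs_sublist : ∀ (ps : List (Int × Char)) (s : List Char),
    (pvDupPairs s ps).Sublist ps := by
  intro ps
  induction ps with
  | nil => intro s; simp [pvDupPairs]
  | cons q rest ih =>
    intro s
    by_cases h : q.2 ∈ s
    · simpa [pvDupPairs, h] using (ih (s ++ [q.2])).cons₂ q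
    · simpa [pvDupPairs, h] using (ih (s ++ [q.2])).cons q

-- Grouping a list by distinct key values is a permutation of the list.
lemma pvPerm_flatMap_filter {α κ : Type} [DecidableEq κ] (key : α → κ) :
    ∀ (l : List α) (D : List κ), D.Nodup → (∀ x ∈ l, key x ∈ D) →
      (D.flatMap (fun k => l.filter (fun x => key x == k))).Perm l := by
  intro l
  induction l with
  | nil => intro D _ _; simp
  | cons x rest ih =>
    intro D hnd hmem
    obtain ⟨D₁, D₂, rfl⟩ := List.append_of_mem (hmem x (by simp))
    have hx1 : key x ∉ D₁ := by
      intro h; exact (List.disjoint_of_nodup_append hnd) h (by simp)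
    have hx2 : key x ∉ D₂ := by
      have h2 := (List.nodup_append.mp hnd).2.1
      exact (List.nodup_cons.mp h2).1
    have hcongr : ∀ (E : List κ), key x ∉ E →
        E.flatMap (fun k => (x :: rest).filter (fun y => key y == k)) =
        E.flatMap (fun k => rest.filter (fun y => key y == k)) := by
      intro E hE
      apply List.flatMap_congr  -- pointwise on E
      intro k hk
      have : (key x == k) = false := by
        simp; intro h; exact hE (h ▸ hk)
      simp [this]
    have hmid : (key x :: D₂).flatMap (fun k => (x :: rest).filter (fun y => key y == k)) =
        (x :: rest.filter (fun y => key y == key x)) ++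
          D₂.flatMap (fun k => rest.filter (fun y => key y == k)) := by
      rw [List.flatMap_cons, hcongr D₂ hx2]
      simp
    have heq : (D₁ ++ key x :: D₂).flatMap (fun k => (x :: rest).filter (fun y => key y == k)) =
        D₁.flatMap (fun k => rest.filter (fun y => key y == k)) ++
          ((x :: rest.filter (fun y => key y == key x)) ++
            D₂.flatMap (fun k => rest.filter (fun y => key y == k))) := by
      rw [List.flatMap_append, hcongr D₁ hx1, hmid]
    rw [heq]
    have h' : ∀ y ∈ rest, key y ∈ D₁ ++ key x :: D₂ := fun y hy => hmem y (by simp [hy])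
    refine List.Perm.trans ?_ ((ih _ hnd h').cons x)
    rw [List.flatMap_append, List.flatMap_cons]
    simp only [List.cons_append]
    exact (List.perm_middle (a := x)
      (l₁ := D₁.flatMap fun k => rest.filter fun y => key y == k)
      (l₂ := rest.filter (fun y => key y == key x) ++ D₂.flatMap fun k => rest.filter fun y => key y == k))

-- pvDupPairs is fst-strictly-increasing on the enumeration of a list.
lemma pvDupPairs_pairwise (cs : List Char) :
    (pvDupPairs [] (PySem.List.enumerate cs)).Pairwise (fun a b => a.1 < b.1) := by
  have hps : (PySem.List.enumerate cs 0).Pairwise (fun a b => a.1 < b.1) := by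
    have := PySem.List.pairwise_lt_pyRange_one 0 (0 + (cs.length : Int))
    rw [← PySem.List.map_fst_enumerate cs 0] at this
    exact (List.pairwise_map.mp this)
  exact List.Pairwise.sublist (pvDupPairs_sublist _ []) hps

-- B's unsorted extras list is exactly the grouped form of pvDupPairs.
lemma pvExtras_eq (cs : List Char) :
    ((PySem.List.enumerate cs).foldl
        (fun d (q : Int × Char) => d.modify q.2 [] (fun l => l ++ [q.1]))
        PySem.Dict.empty).items.flatMap (fun kv => (kv.2.drop 1).map (fun i => (i, kv.1)))
      = (PySem.Set.ofList cs).flatMap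
          (fun c => (pvDupPairs [] (PySem.List.enumerate cs)).filter (fun q => q.2 == c)) := by
  set ps := PySem.List.enumerate cs 0 with hps
  set pos := ps.foldl (fun d (q : Int × Char) => d.modify q.2 [] (fun l => l ++ [q.1]))
      PySem.Dict.empty with hpos
  have hkeys : pos.keys = PySem.Set.ofList cs := by
    rw [hpos, PySem.Dict.keys_foldl_modify_key ps (fun q => q.2) []
      (fun _ q => (fun l => l ++ [q.1])) PySem.Dict.empty]
    rw [PySem.List.map_snd_enumerate]
    simp [PySem.Set.update, PySem.Set.ofList_eq_foldl, PySem.Dict.keys, PySem.Dict.empty]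
  have hnd : pos.keys.Nodup := by
    rw [hkeys]; exact PySem.Set.nodup_ofList cs
  have hgetD : ∀ c, pos.getD c [] = (ps.filter (fun q => q.2 == c)).map (fun q => q.1) := by
    intro c
    have hswap : pos = (ps.map (fun q => (q.2, q.1))).foldl
        (fun d p => d.modify p.1 [] (fun l => l ++ [p.2])) PySem.Dict.empty := by
      rw [List.foldl_map]
    rw [hswap, PySem.Dict.getD_foldl_modify_append]
    simp [List.filter_map, List.map_map, Function.comp_def]
  rw [PySem.Dict.items_eq_map_keys pos hnd [], hkeys, List.flatMap_map]
  apply List.flatMap_congr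
  intro c _
  rw [hgetD c, pvDupPairs_filter ps [] c]
  simp only [List.not_mem_nil, if_false]
  rw [← List.map_drop, List.map_map]
  have : ∀ q ∈ (ps.filter (fun q => q.2 == c)).drop 1,
      ((fun i => (i, c)) ∘ fun (q : Int × Char) => q.1) q = id q := by
    intro q hq
    have hqf := List.mem_of_mem_drop hq
    have : q.2 = c := by simpa using (List.of_mem_filter hqf)
    simp [Function.comp, ← this]
  rw [List.map_congr_left this, List.map_id]

-- ===== VERDICT (by name: the statement is the Claim_ definition above) =====
theorem makeDuplicateLetterString_spec : Claim_equal_makeDuplicateLetterString := by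
  intro key _
  unfold Spec_makeDuplicateLetterString makeDuplicateLetterString makeDuplicateLetterString_alt
  set cs := key.toList with hcs
  set ps := PySem.List.enumerate cs 0 with hps
  set T := pvDupPairs [] ps with hT
  -- A's loop
  have hA : (cs.foldl
      (fun (st : PySem.Set Char × List Char) letter =>
        if PySem.Set.contains st.1 letter then (st.1, st.2 ++ [letter])
        else (PySem.Set.add st.1 letter, st.2))
      (PySem.Set.empty, [])).2 = T.map (fun q => q.2) := by
    have h0 : PySem.Set.ofList ([] : List Char) = PySem.Set.empty := rfl
    have := pvA_loop cs [] []
    rw [h0] at this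
    rw [this]
    have hsnd : pvDupSpec [] cs = T.map (fun q => q.2) := by
      rw [hT, hps, ← pvDupSpec_eq_pairs, PySem.List.map_snd_enumerate]
    simpa using hsnd
  -- B's sorted extras list is T
  have hperm : T.Perm (((PySem.List.enumerate cs).foldl
      (fun d (q : Int × Char) => d.modify q.2 [] (fun l => l ++ [q.1]))
      PySem.Dict.empty).items.flatMap (fun kv => (kv.2.drop 1).map (fun i => (i, kv.1)))) := by
    rw [pvExtras_eq cs]
    refine (pvPerm_flatMap_filter (fun (q : Int × Char) => q.2) T (PySem.Set.ofList cs) (PySem.Set.nodup_ofList cs) ?_).symm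
    intro q hq
    have hq' : q ∈ ps := (pvDupPairs_sublist ps []).mem (by exact hq)
    have : q.2 ∈ cs := by
      rw [← PySem.List.map_snd_enumerate cs 0]
      exact List.mem_map_of_mem hq'
    exact (PySem.Set.mem_ofList cs q.2).mpr this
  have hsorted : PySem.List.sorted (((PySem.List.enumerate cs).foldl
      (fun d (q : Int × Char) => d.modify q.2 [] (fun l => l ++ [q.1]))
      PySem.Dict.empty).items.flatMap (fun kv => (kv.2.drop 1).map (fun i => (i, kv.1))))
      (fun p => p.1) = T :=
    PySem.List.sorted_eq_of_perm_of_pairwise_lt _ _ _ hperm (pvDupPairs_pairwise cs)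
  simp only [hA, hsorted]
  rcases T with _ | ⟨x, xs⟩ <;> simp [List.map_map, Function.comp_def]
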